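-- pv_equiv track=rewrite | github.com/andreasftk/Human-Gesture-Recognition-Project | data_A_segmentation/data_segmentation_A5.py | get_movement_segments
-- ===== SOURCE A (Python) =====
-- def get_movement_segments(movement_series):
--     segments = []
--     start_idx = None
--
--     for i in range(len(movement_series)):
--         if movement_series[i] == 1:
--             if start_idx is None:
--                 start_idx = i
--         else:
--             if start_idx is not None:
--                 segments.append((start_idx, i))
--                 start_idx = None
--
--     if start_idx is not None:
--         segments.append((start_idx, len(movement_series)))
--
--     return segments
-- ===== SOURCE B (Python) =====
-- from itertools import groupby
--
-- def get_movement_segments(movement_series):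
--     segments = []
--     offset = 0
--     for key, group in groupby(movement_series, key=lambda x: x == 1):
--         length = sum(1 for _ in group)
--         if key:
--             segments.append((offset, offset + length))
--         offset += length
--     return segments
-- ===== Notes on version B (the rewrite author's own statement) =====
-- stated objective: idiomatic
-- what changed: Replaces the manual start_idx toggling state machine by itertools.groupby on x == 1: form maximal runs, emit (offset, offset+length) for runs of 1s, advance the offset by each run's length.
import Mathlib
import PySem

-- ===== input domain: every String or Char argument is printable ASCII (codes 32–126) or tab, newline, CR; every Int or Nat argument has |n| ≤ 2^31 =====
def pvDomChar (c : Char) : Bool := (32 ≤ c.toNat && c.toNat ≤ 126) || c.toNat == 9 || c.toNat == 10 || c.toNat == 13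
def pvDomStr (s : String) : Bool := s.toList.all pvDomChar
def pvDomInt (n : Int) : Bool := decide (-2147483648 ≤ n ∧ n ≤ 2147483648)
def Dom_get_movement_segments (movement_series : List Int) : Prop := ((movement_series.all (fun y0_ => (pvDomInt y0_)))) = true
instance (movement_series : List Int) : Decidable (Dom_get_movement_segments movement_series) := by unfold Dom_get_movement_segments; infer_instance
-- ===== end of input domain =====

-- B replaces A's manual start_idx state machine by grouping the series into maximal
-- runs keyed on x == 1 (itertools.groupby) and emitting one segment per run of 1s.

-- ===== PORT A =====
-- A's for-loop over i in range(len(ms)), reading ms[i]: ported as a recursion over the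
-- elements carrying the index i and the loop state (segments, start_idx).
def aLoop : List Int → Int → List (Int × Int) → Option Int → (List (Int × Int) × Option Int)
  | [], _, segments, start_idx => (segments, start_idx)
  | x :: xs, i, segments, start_idx =>
    if x = 1 then
      match start_idx with
      | none => aLoop xs (i + 1) segments (some i)
      | some s => aLoop xs (i + 1) segments (some s)
    else
      match start_idx with
      | some s => aLoop xs (i + 1) (segments ++ [(s, i)]) none
      | none => aLoop xs (i + 1) segments none

def get_movement_segments (movement_series : List Int) : List (Int × Int) :=
  match aLoop movement_series 0 [] none with
  | (segments, none) => segments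
  | (segments, some s) => segments ++ [(s, (movement_series.length : Int))]

-- ===== PORT B =====
-- groupby(ms, key=lambda x: x == 1): each step takes the maximal run sharing the head's
-- key, emits (offset, offset+len) if the key is True, and advances offset by len.
def altGo : List Int → Int → List (Int × Int)
  | [], _ => []
  | x :: xs, offset =>
    let k : Bool := x = 1
    let run := List.takeWhile (fun y => (decide (y = 1)) == k) (x :: xs)
    let rest := List.dropWhile (fun y => (decide (y = 1)) == k) (x :: xs)
    let len : Int := run.length
    (if k then [(offset, offset + len)] else []) ++ altGo rest (offset + len)
termination_by l _ => l.length
decreasing_by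
  simp only [List.dropWhile_cons]
  split
  · exact Nat.lt_succ_of_le (List.length_dropWhile_le _ _)
  · simp_all

def get_movement_segments_alt (movement_series : List Int) : List (Int × Int) :=
  altGo movement_series 0

-- ===== PRECONDITION & SPEC =====
def Spec_get_movement_segments (movement_series : List Int) (out : List (Int × Int)) : Prop := out = get_movement_segments_alt movement_series
instance (movement_series : List Int) (out : List (Int × Int)) : Decidable (Spec_get_movement_segments movement_series out) := by unfold Spec_get_movement_segments; infer_instance

-- ===== CLAIM (what is proved, stated in full; the proofs are below) =====
def Claim_equal_get_movement_segments : Prop := ∀ (movement_series : List Int), Dom_get_movement_segments movement_series → Spec_get_movement_segments movement_series (get_movement_segments movement_series)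

-- ===== LEMMAS AND PROOFS =====

-- closing the loop state at final position n
def finishAt (n : Int) : (List (Int × Int) × Option Int) → List (Int × Int)
  | (segments, none) => segments
  | (segments, some s) => segments ++ [(s, n)]

-- accumulator lemma: segments are only appended to
theorem aLoop_acc (l : List Int) (i : Int) (segments : List (Int × Int)) (st : Option Int) :
    aLoop l i segments st = (segments ++ (aLoop l i [] st).1, (aLoop l i [] st).2) := by
  induction l generalizing i segments st with
  | nil => simp [aLoop]
  | cons x xs ih =>
    by_cases hx : x = 1
    · cases st with
      | none =>
        simp only [aLoop, if_pos hx]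
        rw [ih (i+1) segments (some i), ih (i+1) [] (some i)]
      | some s =>
        simp only [aLoop, if_pos hx]
        rw [ih (i+1) segments (some s), ih (i+1) [] (some s)]
    · cases st with
      | none =>
        simp only [aLoop, if_neg hx]
        rw [ih (i+1) segments none, ih (i+1) [] none]
      | some s =>
        simp only [aLoop, if_neg hx, List.nil_append]
        rw [ih (i+1) (segments ++ [(s, i)]) none, ih (i+1) [(s, i)] none]
        simp

-- a run of non-1s with no open segment just advances the index
theorem aLoop_zeros (l rest : List Int) (i : Int)
    (h : ∀ x ∈ l, x ≠ 1) :
    aLoop (l ++ rest) i [] none = aLoop rest (i + l.length) [] none := by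
  induction l generalizing i with
  | nil => simp
  | cons x xs ih =>
    have hx : x ≠ 1 := h x (by simp)
    simp only [List.cons_append, aLoop, if_neg hx]
    rw [ih (i+1) (fun y hy => h y (by simp [hy]))]
    congr 1
    simp only [List.length_cons]
    push_cast
    omega

-- a run of 1s with an open segment keeps the segment open
theorem aLoop_ones (l rest : List Int) (i s : Int)
    (h : ∀ x ∈ l, x = 1) :
    aLoop (l ++ rest) i [] (some s) = aLoop rest (i + l.length) [] (some s) := by
  induction l generalizing i with
  | nil => simp
  | cons x xs ih =>
    have hx : x = 1 := h x (by simp)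
    simp only [List.cons_append, aLoop, if_pos hx]
    rw [ih (i+1) (fun y hy => h y (by simp [hy]))]
    congr 1
    simp only [List.length_cons]
    push_cast
    omega

theorem main_lemma (l : List Int) (off : Int) :
    finishAt (off + l.length) (aLoop l off [] none) = altGo l off := by
  induction hn : l.length using Nat.strong_induction_on generalizing l off with
  | _ n ih =>
  match l with
  | [] => simp [aLoop, altGo, finishAt]
  | x :: xs =>
    set p : Int → Bool := fun y => (decide (y = 1)) == (decide (x = 1)) with hp
    have hpx : p x = true := by simp [hp]
    have hrun_pos : 0 < ((x :: xs).takeWhile p).length := by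
      simp [hpx]
    have hsplit : (x :: xs).takeWhile p ++ (x :: xs).dropWhile p = x :: xs :=
      List.takeWhile_append_dropWhile
    have hlen : ((x :: xs).takeWhile p).length + ((x :: xs).dropWhile p).length
        = (x :: xs).length := by
      rw [← List.length_append, hsplit]
    have hrest_lt : ((x :: xs).dropWhile p).length < (x :: xs).length := by omega
    by_cases hx : x = 1
    · -- run of 1s
      have hkey : (decide (x = 1)) = true := by simp [hx]
      have hones : ∀ y ∈ (x :: xs).takeWhile p, y = 1 := by
        intro y hy
        have := List.mem_takeWhile_imp hy
        simp [hp, hkey] at this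
        exact this
      -- step A through the run: first element opens at off, rest keep it open
      have hrun : (x :: xs).takeWhile p = x :: xs.takeWhile p := by
        simp [hpx]
      have hA : aLoop (x :: xs) off [] none
          = aLoop ((x :: xs).dropWhile p) (off + ((x :: xs).takeWhile p).length) [] (some off) := by
        conv_lhs => rw [← hsplit, hrun]
        simp only [List.cons_append, aLoop, if_pos hx]
        rw [aLoop_ones _ _ _ _ (fun y hy => hones y (by rw [hrun]; exact List.mem_cons_of_mem _ hy))]
        congr 1
        rw [hrun]
        simp only [List.length_cons]
        push_cast
        ring
      rw [hA]
      match hrestE : (x :: xs).dropWhile p with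
      | [] =>
        have : ((x :: xs).takeWhile p).length = (x :: xs).length := by
          rw [hrestE] at hlen; simpa using hlen
        simp only [aLoop, finishAt]
        rw [altGo]
        simp only [← hp, hrestE, if_pos hkey]
        rw [altGo]
        simp [this, hn]
      | y :: ys =>
        have hy1 : y ≠ 1 := by
          have hne : (x :: xs).dropWhile p ≠ [] := by rw [hrestE]; simp
          have h3 := List.head_dropWhile_not p hne
          have hhq : ((x :: xs).dropWhile p).head? = some y := by rw [hrestE]; rfl
          rw [List.head?_eq_some_head hne] at hhq
          rw [Option.some.inj hhq] at h3
          simp [hp, hkey] at h3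
          exact h3
        simp only [aLoop, if_neg hy1]
        rw [aLoop_acc]
        rw [altGo]
        simp only [← hp, hrestE, if_pos hkey]
        have hih := ih ((y :: ys).length) (by rw [← hrestE]; omega) (y :: ys)
          (off + ((x :: xs).takeWhile p).length) rfl
        rw [altGo] at *
        -- relate finishAt of shifted aLoop with the ih
        have hstep : aLoop (y :: ys) (off + ((x :: xs).takeWhile p).length) [] none
            = aLoop ys (off + ((x :: xs).takeWhile p).length + 1) [] none := by
          simp [aLoop, if_neg hy1]
        rw [hstep] at hih
        cases hE : aLoop ys (off + ((x :: xs).takeWhile p).length + 1) [] none with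
        | mk segs st =>
          rw [hE] at hih
          cases st with
          | none =>
            simp only [finishAt] at hih ⊢
            simp only [List.nil_append]
            exact congrArg (fun t => [(off, off + (((x :: xs).takeWhile p).length : Int))] ++ t) hih
          | some s =>
            simp only [finishAt] at hih ⊢
            rw [List.append_assoc, ← hih]
            have : off + (↑n : Int) = off + ((x :: xs).takeWhile p).length + (y :: ys).length := by
              rw [hrestE, hn] at hlen
              omega
            rw [this]
            simp
    · -- run of non-1s
      have hkey : (decide (x = 1)) = false := by simp [hx]
      have hzeros : ∀ y ∈ (x :: xs).takeWhile p, y ≠ 1 := by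
        intro y hy
        have := List.mem_takeWhile_imp hy
        simp [hp, hkey] at this
        exact this
      have hA : aLoop (x :: xs) off [] none
          = aLoop ((x :: xs).dropWhile p) (off + ((x :: xs).takeWhile p).length) [] none := by
        conv_lhs => rw [← hsplit]
        exact aLoop_zeros _ _ _ hzeros
      rw [hA]
      rw [altGo]
      simp only [← hp, if_neg (by simp [hkey] : ¬ (decide (x = 1) : Bool) = true)]
      have hih := ih (((x :: xs).dropWhile p).length) (by omega) ((x :: xs).dropWhile p)
        (off + ((x :: xs).takeWhile p).length) rfl
      rw [← hih]
      congr 1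
      rw [hn] at hlen
      omega

-- ===== VERDICT (by name: the statement is the Claim_ definition above) =====
theorem get_movement_segments_spec : Claim_equal_get_movement_segments := by
  intro ms _
  show get_movement_segments ms = get_movement_segments_alt ms
  have h := main_lemma ms 0
  unfold get_movement_segments get_movement_segments_alt
  rw [← h]
  cases hE : aLoop ms 0 [] none with
  | mk segs st =>
    cases st <;> simp [finishAt]
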